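-- pv_equiv track=rewrite | github.com/joined/superenalotto | superEnalotto/__init__.py | check_giocate
-- ===== SOURCE A (Python) =====
-- giocate = [[7, 16, 22, 56, 67, 88],
--            [9, 14, 36, 56, 67, 87],
--            [8, 31, 35, 45, 66, 87],
--            [10, 21, 30, 57, 63, 74],
--            [13, 40, 56, 74, 81, 90],
--            [16, 23, 40, 55, 60, 82],
--            [16, 41, 43, 52, 61, 80],
--            [3, 27, 33, 36, 57, 84]]
--
-- def check_giocate(numeri_estrazione):
--     risultato = []
--
--     for giocata in giocate:
--         numeri_giusti = [num for num
--                          in numeri_estrazione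
--                          if int(num) in giocata]
--
--         if len(numeri_giusti) > 0:
--             risultato.append(numeri_giusti)
--
--     return risultato
-- ===== SOURCE B (Python) =====
-- # Inverted bitmask index: for each drawable number, a bitmask of the fixed rows
-- # that contain it (bit j set <=> row j of the original `giocate` table contains it).
-- _MASK = {7: 1, 16: 97, 22: 1, 56: 19, 67: 3, 88: 1, 9: 2, 14: 2, 36: 130,
--          87: 6, 8: 4, 31: 4, 35: 4, 45: 4, 66: 4, 10: 8, 21: 8, 30: 8,
--          57: 136, 63: 8, 74: 24, 13: 16, 40: 48, 81: 16, 90: 16, 23: 32,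
--          55: 32, 60: 32, 82: 32, 41: 64, 43: 64, 52: 64, 61: 64, 80: 64,
--          3: 128, 27: 128, 33: 128, 84: 128}
--
--
-- def check_giocate(numeri_estrazione):
--     buckets = [[] for _ in range(8)]
--     for num in numeri_estrazione:
--         m = _MASK.get(int(num), 0)
--         j = 0
--         while m:
--             if m & 1:
--                 buckets[j].append(num)
--             m >>= 1
--             j += 1
--     return [b for b in buckets if b]
-- ===== Notes on version B (the rewrite author's own statement) =====
-- stated objective: faster
-- what changed: Replaces A's eight per-row rescans of the draw (a list-membership test per row per drawn number) with a precomputed literal bitmask index number->rows plus a single pass over the draw that decodes each mask bit by bit into per-row buckets, emitting nonempty buckets in row order.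
import Mathlib
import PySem

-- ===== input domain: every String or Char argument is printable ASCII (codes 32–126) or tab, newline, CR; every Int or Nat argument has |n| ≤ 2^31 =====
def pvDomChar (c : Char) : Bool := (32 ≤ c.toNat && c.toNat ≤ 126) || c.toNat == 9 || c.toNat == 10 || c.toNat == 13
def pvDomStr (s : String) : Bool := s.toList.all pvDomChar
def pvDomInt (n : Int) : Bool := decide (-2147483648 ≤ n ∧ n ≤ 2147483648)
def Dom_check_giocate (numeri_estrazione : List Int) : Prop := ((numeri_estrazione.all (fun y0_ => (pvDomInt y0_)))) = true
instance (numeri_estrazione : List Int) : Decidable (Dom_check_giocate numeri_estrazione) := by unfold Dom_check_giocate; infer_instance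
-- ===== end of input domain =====

-- B replaces A's eight per-row rescans of the draw by a literal bitmask index
-- (number -> bitmask of rows containing it) and one bit-decoding pass over the draw
-- (objective: faster, constant-factor; same return value).

-- ===== PORT A =====
-- the module constant `giocate` (A's fixed bet rows)
def giocateL : List (List Int) :=
  [[7, 16, 22, 56, 67, 88], [9, 14, 36, 56, 67, 87], [8, 31, 35, 45, 66, 87],
   [10, 21, 30, 57, 63, 74], [13, 40, 56, 74, 81, 90], [16, 23, 40, 55, 60, 82],
   [16, 41, 43, 52, 61, 80], [3, 27, 33, 36, 57, 84]]

-- for giocata in giocate: numeri_giusti = [num for num in draw if int(num) in giocata]; append when nonempty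
def check_giocate (numeri_estrazione : List Int) : List (List Int) :=
  giocateL.foldl
    (fun risultato giocata =>
      let numeri_giusti := numeri_estrazione.filter (fun num => giocata.contains num)
      if numeri_giusti.length > 0 then risultato ++ [numeri_giusti] else risultato)
    []

-- ===== PORT B =====
-- the literal module constant _MASK of Source B: number -> bitmask of rows containing it
def pvMask : PySem.Dict Int Nat :=
  ⟨[(7, 1), (16, 97), (22, 1), (56, 19), (67, 3), (88, 1), (9, 2), (14, 2), (36, 130),
    (87, 6), (8, 4), (31, 4), (35, 4), (45, 4), (66, 4), (10, 8), (21, 8), (30, 8),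
    (57, 136), (63, 8), (74, 24), (13, 16), (40, 48), (81, 16), (90, 16), (23, 32),
    (55, 32), (60, 32), (82, 32), (41, 64), (43, 64), (52, 64), (61, 64), (80, 64),
    (3, 128), (27, 128), (33, 128), (84, 128)]⟩

-- the inner while loop of Source B: while m: if m & 1: buckets[j].append(num); m >>= 1; j += 1
def spread (num : Int) (j : Nat) (m : Nat) (bs : List (List Int)) : List (List Int) :=
  if m = 0 then bs
  else spread num (j + 1) (m / 2) (if m % 2 = 1 then bs.modify j (· ++ [num]) else bs)
termination_by m
decreasing_by exact Nat.div_lt_self (Nat.pos_of_ne_zero (by assumption)) (by norm_num)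

-- buckets = [[] for _ in range(8)]; for num in draw: decode _MASK.get(int(num), 0) bit by bit;
-- return [b for b in buckets if b]
def check_giocate_alt (numeri_estrazione : List Int) : List (List Int) :=
  let buckets : List (List Int) := (List.range 8).map (fun _ => ([] : List Int))
  (numeri_estrazione.foldl (fun bs num => spread num 0 (pvMask.getD num 0) bs) buckets).filter
    (fun b => !b.isEmpty)

-- ===== PRECONDITION & SPEC =====
def Spec_check_giocate (numeri_estrazione : List Int) (out : List (List Int)) : Prop := out = check_giocate_alt numeri_estrazione
instance (numeri_estrazione : List Int) (out : List (List Int)) : Decidable (Spec_check_giocate numeri_estrazione out) := by unfold Spec_check_giocate; infer_instance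

-- ===== CLAIM (what is proved, stated in full; the proofs are below) =====
def Claim_equal_check_giocate : Prop := ∀ (numeri_estrazione : List Int), Dom_check_giocate numeri_estrazione → Spec_check_giocate numeri_estrazione (check_giocate numeri_estrazione)

-- ===== LEMMAS AND PROOFS =====

-- one draw number n hits exactly the buckets of the rows containing it
theorem step8 (n : Int) (b0 b1 b2 b3 b4 b5 b6 b7 : List Int) :
    spread n 0 (pvMask.getD n 0) [b0, b1, b2, b3, b4, b5, b6, b7]
    = [if [7,16,22,56,67,88].contains n then b0 ++ [n] else b0,
       if [9,14,36,56,67,87].contains n then b1 ++ [n] else b1,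
       if [8,31,35,45,66,87].contains n then b2 ++ [n] else b2,
       if [10,21,30,57,63,74].contains n then b3 ++ [n] else b3,
       if [13,40,56,74,81,90].contains n then b4 ++ [n] else b4,
       if [16,23,40,55,60,82].contains n then b5 ++ [n] else b5,
       if [16,41,43,52,61,80].contains n then b6 ++ [n] else b6,
       if [3,27,33,36,57,84].contains n then b7 ++ [n] else b7] := by
  simp only [pvMask, PySem.Dict.getD, PySem.Dict.get?, List.find?]
  rcases eq_or_ne n 7 with rfl | h7
  · simp [spread, List.modify]
  rw [(beq_eq_false_iff_ne.mpr (Ne.symm h7) : ((7:Int) == n) = false)]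
  rcases eq_or_ne n 16 with rfl | h16
  · simp [spread, List.modify]
  rw [(beq_eq_false_iff_ne.mpr (Ne.symm h16) : ((16:Int) == n) = false)]
  rcases eq_or_ne n 22 with rfl | h22
  · simp [spread, List.modify]
  rw [(beq_eq_false_iff_ne.mpr (Ne.symm h22) : ((22:Int) == n) = false)]
  rcases eq_or_ne n 56 with rfl | h56
  · simp [spread, List.modify]
  rw [(beq_eq_false_iff_ne.mpr (Ne.symm h56) : ((56:Int) == n) = false)]
  rcases eq_or_ne n 67 with rfl | h67
  · simp [spread, List.modify]
  rw [(beq_eq_false_iff_ne.mpr (Ne.symm h67) : ((67:Int) == n) = false)]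
  rcases eq_or_ne n 88 with rfl | h88
  · simp [spread, List.modify]
  rw [(beq_eq_false_iff_ne.mpr (Ne.symm h88) : ((88:Int) == n) = false)]
  rcases eq_or_ne n 9 with rfl | h9
  · simp [spread, List.modify]
  rw [(beq_eq_false_iff_ne.mpr (Ne.symm h9) : ((9:Int) == n) = false)]
  rcases eq_or_ne n 14 with rfl | h14
  · simp [spread, List.modify]
  rw [(beq_eq_false_iff_ne.mpr (Ne.symm h14) : ((14:Int) == n) = false)]
  rcases eq_or_ne n 36 with rfl | h36
  · simp [spread, List.modify]
  rw [(beq_eq_false_iff_ne.mpr (Ne.symm h36) : ((36:Int) == n) = false)]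
  rcases eq_or_ne n 87 with rfl | h87
  · simp [spread, List.modify]
  rw [(beq_eq_false_iff_ne.mpr (Ne.symm h87) : ((87:Int) == n) = false)]
  rcases eq_or_ne n 8 with rfl | h8
  · simp [spread, List.modify]
  rw [(beq_eq_false_iff_ne.mpr (Ne.symm h8) : ((8:Int) == n) = false)]
  rcases eq_or_ne n 31 with rfl | h31
  · simp [spread, List.modify]
  rw [(beq_eq_false_iff_ne.mpr (Ne.symm h31) : ((31:Int) == n) = false)]
  rcases eq_or_ne n 35 with rfl | h35
  · simp [spread, List.modify]
  rw [(beq_eq_false_iff_ne.mpr (Ne.symm h35) : ((35:Int) == n) = false)]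
  rcases eq_or_ne n 45 with rfl | h45
  · simp [spread, List.modify]
  rw [(beq_eq_false_iff_ne.mpr (Ne.symm h45) : ((45:Int) == n) = false)]
  rcases eq_or_ne n 66 with rfl | h66
  · simp [spread, List.modify]
  rw [(beq_eq_false_iff_ne.mpr (Ne.symm h66) : ((66:Int) == n) = false)]
  rcases eq_or_ne n 10 with rfl | h10
  · simp [spread, List.modify]
  rw [(beq_eq_false_iff_ne.mpr (Ne.symm h10) : ((10:Int) == n) = false)]
  rcases eq_or_ne n 21 with rfl | h21
  · simp [spread, List.modify]
  rw [(beq_eq_false_iff_ne.mpr (Ne.symm h21) : ((21:Int) == n) = false)]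
  rcases eq_or_ne n 30 with rfl | h30
  · simp [spread, List.modify]
  rw [(beq_eq_false_iff_ne.mpr (Ne.symm h30) : ((30:Int) == n) = false)]
  rcases eq_or_ne n 57 with rfl | h57
  · simp [spread, List.modify]
  rw [(beq_eq_false_iff_ne.mpr (Ne.symm h57) : ((57:Int) == n) = false)]
  rcases eq_or_ne n 63 with rfl | h63
  · simp [spread, List.modify]
  rw [(beq_eq_false_iff_ne.mpr (Ne.symm h63) : ((63:Int) == n) = false)]
  rcases eq_or_ne n 74 with rfl | h74
  · simp [spread, List.modify]
  rw [(beq_eq_false_iff_ne.mpr (Ne.symm h74) : ((74:Int) == n) = false)]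
  rcases eq_or_ne n 13 with rfl | h13
  · simp [spread, List.modify]
  rw [(beq_eq_false_iff_ne.mpr (Ne.symm h13) : ((13:Int) == n) = false)]
  rcases eq_or_ne n 40 with rfl | h40
  · simp [spread, List.modify]
  rw [(beq_eq_false_iff_ne.mpr (Ne.symm h40) : ((40:Int) == n) = false)]
  rcases eq_or_ne n 81 with rfl | h81
  · simp [spread, List.modify]
  rw [(beq_eq_false_iff_ne.mpr (Ne.symm h81) : ((81:Int) == n) = false)]
  rcases eq_or_ne n 90 with rfl | h90
  · simp [spread, List.modify]
  rw [(beq_eq_false_iff_ne.mpr (Ne.symm h90) : ((90:Int) == n) = false)]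
  rcases eq_or_ne n 23 with rfl | h23
  · simp [spread, List.modify]
  rw [(beq_eq_false_iff_ne.mpr (Ne.symm h23) : ((23:Int) == n) = false)]
  rcases eq_or_ne n 55 with rfl | h55
  · simp [spread, List.modify]
  rw [(beq_eq_false_iff_ne.mpr (Ne.symm h55) : ((55:Int) == n) = false)]
  rcases eq_or_ne n 60 with rfl | h60
  · simp [spread, List.modify]
  rw [(beq_eq_false_iff_ne.mpr (Ne.symm h60) : ((60:Int) == n) = false)]
  rcases eq_or_ne n 82 with rfl | h82
  · simp [spread, List.modify]
  rw [(beq_eq_false_iff_ne.mpr (Ne.symm h82) : ((82:Int) == n) = false)]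
  rcases eq_or_ne n 41 with rfl | h41
  · simp [spread, List.modify]
  rw [(beq_eq_false_iff_ne.mpr (Ne.symm h41) : ((41:Int) == n) = false)]
  rcases eq_or_ne n 43 with rfl | h43
  · simp [spread, List.modify]
  rw [(beq_eq_false_iff_ne.mpr (Ne.symm h43) : ((43:Int) == n) = false)]
  rcases eq_or_ne n 52 with rfl | h52
  · simp [spread, List.modify]
  rw [(beq_eq_false_iff_ne.mpr (Ne.symm h52) : ((52:Int) == n) = false)]
  rcases eq_or_ne n 61 with rfl | h61
  · simp [spread, List.modify]
  rw [(beq_eq_false_iff_ne.mpr (Ne.symm h61) : ((61:Int) == n) = false)]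
  rcases eq_or_ne n 80 with rfl | h80
  · simp [spread, List.modify]
  rw [(beq_eq_false_iff_ne.mpr (Ne.symm h80) : ((80:Int) == n) = false)]
  rcases eq_or_ne n 3 with rfl | h3
  · simp [spread, List.modify]
  rw [(beq_eq_false_iff_ne.mpr (Ne.symm h3) : ((3:Int) == n) = false)]
  rcases eq_or_ne n 27 with rfl | h27
  · simp [spread, List.modify]
  rw [(beq_eq_false_iff_ne.mpr (Ne.symm h27) : ((27:Int) == n) = false)]
  rcases eq_or_ne n 33 with rfl | h33
  · simp [spread, List.modify]
  rw [(beq_eq_false_iff_ne.mpr (Ne.symm h33) : ((33:Int) == n) = false)]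
  rcases eq_or_ne n 84 with rfl | h84
  · simp [spread, List.modify]
  rw [(beq_eq_false_iff_ne.mpr (Ne.symm h84) : ((84:Int) == n) = false)]
  simp_all [spread]

-- the whole pass over the draw fills bucket i with exactly A's filter for row i
theorem fold8 (xs : List Int) (b0 b1 b2 b3 b4 b5 b6 b7 : List Int) :
    xs.foldl (fun bs num => spread num 0 (pvMask.getD num 0) bs) [b0, b1, b2, b3, b4, b5, b6, b7]
    = [b0 ++ xs.filter (fun n => [7,16,22,56,67,88].contains n),
       b1 ++ xs.filter (fun n => [9,14,36,56,67,87].contains n),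
       b2 ++ xs.filter (fun n => [8,31,35,45,66,87].contains n),
       b3 ++ xs.filter (fun n => [10,21,30,57,63,74].contains n),
       b4 ++ xs.filter (fun n => [13,40,56,74,81,90].contains n),
       b5 ++ xs.filter (fun n => [16,23,40,55,60,82].contains n),
       b6 ++ xs.filter (fun n => [16,41,43,52,61,80].contains n),
       b7 ++ xs.filter (fun n => [3,27,33,36,57,84].contains n)] := by
  induction xs generalizing b0 b1 b2 b3 b4 b5 b6 b7 with
  | nil => simp
  | cons n xs ih =>
    rw [List.foldl_cons, step8, ih]
    simp only [List.filter_cons, List.cons.injEq, and_true]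
    and_intros <;> (split_ifs <;> simp)

-- A's outer loop, characterised with a general accumulator
theorem foldlA (rows : List (List Int)) (xs : List Int) (acc : List (List Int)) :
    rows.foldl
      (fun risultato giocata =>
        let numeri_giusti := xs.filter (fun num => giocata.contains num)
        if numeri_giusti.length > 0 then risultato ++ [numeri_giusti] else risultato)
      acc
    = acc ++ (rows.map (fun giocata => xs.filter (fun num => giocata.contains num))).filter
        (fun l => decide (l.length > 0)) := by
  induction rows generalizing acc with
  | nil => simp
  | cons g rows ih =>
    rw [List.foldl_cons, ih]
    simp only [List.map_cons, List.filter_cons, decide_eq_true_eq, gt_iff_lt]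
    split_ifs with h <;> simp [List.append_assoc]

-- ===== VERDICT (by name: the statement is the Claim_ definition above) =====
theorem check_giocate_spec : Claim_equal_check_giocate := by
  intro xs _
  show check_giocate xs = check_giocate_alt xs
  unfold check_giocate check_giocate_alt
  rw [foldlA]
  dsimp only
  rw [show (List.range 8).map (fun _ => ([]:List Int)) = [[],[],[],[],[],[],[],[]] from rfl, fold8]
  simp only [List.nil_append, giocateL, List.map]
  exact List.filter_congr (fun l _ => by cases l <;> rfl)
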